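-- pv_equiv track=rewrite | github.com/GasnierGabriel/NSI | GASNIER_Gabriel_Pyramide.py | door_build
-- ===== SOURCE A (Python) =====
-- from math import ceil
--
-- def door_build(size_door, rank, size_floor, j, door):
--     count = 0
--     for i in range(size_door):
--         if rank >= 5 and j == ceil(((size_floor - 2) / 2) + 1) and count == size_door-2:
--             return door + '$|'
--         door += '|'
--         count += 1
--     return door
-- ===== SOURCE B (Python) =====
-- def door_build(size_door, rank, size_floor, j, door):
--     if rank >= 5 and j == (size_floor - 1) // 2 + 1 and size_door >= 2:
--         return door + '|' * (size_door - 2) + '$|'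
--     return door + '|' * size_door
-- ===== Notes on version B (the rewrite author's own statement) =====
-- stated objective: simpler
-- what changed: Replaced the counting loop (which re-evaluates the ceil trigger every iteration) with one closed-form test plus bulk string repetition.
import Mathlib
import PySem

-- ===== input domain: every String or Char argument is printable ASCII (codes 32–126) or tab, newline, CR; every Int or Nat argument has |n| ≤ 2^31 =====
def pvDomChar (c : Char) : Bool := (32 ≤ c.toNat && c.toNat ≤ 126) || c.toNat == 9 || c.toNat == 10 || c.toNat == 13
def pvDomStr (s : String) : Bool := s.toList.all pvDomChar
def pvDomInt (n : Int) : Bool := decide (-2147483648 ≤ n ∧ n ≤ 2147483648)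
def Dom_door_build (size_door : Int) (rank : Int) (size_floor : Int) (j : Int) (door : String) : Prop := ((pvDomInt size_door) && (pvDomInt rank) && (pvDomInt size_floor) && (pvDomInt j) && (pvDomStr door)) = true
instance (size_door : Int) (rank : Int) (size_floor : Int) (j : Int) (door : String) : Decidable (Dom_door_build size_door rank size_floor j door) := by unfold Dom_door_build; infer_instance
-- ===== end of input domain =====

-- B replaces A's counting loop with a single closed-form test plus string repetition (objective: simpler).
-- Both ports build the result over List Char (PySem convention); the return value is the same String.

-- ===== PORT A =====
-- Python's ceil(((size_floor-2)/2)+1) is float arithmetic, exact for |size_floor| ≤ 2^31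
-- (division by 2 is exact in binary floating point); it equals -((-(size_floor-2))//2)+1 in ints,
-- ported as -(floordiv (-(size_floor-2)) 2) + 1.
def door_build_go (size_door : Int) (rank : Int) (size_floor : Int) (j : Int) :
    Nat → Int → List Char → List Char
  | 0, _, door => door
  | n+1, count, door =>
    if rank ≥ 5 ∧ j = -(PySem.Int.floordiv (-(size_floor - 2)) 2) + 1 ∧ count = size_door - 2 then
      door ++ ['$', '|']
    else
      door_build_go size_door rank size_floor j n (count + 1) (door ++ ['|'])

def door_build (size_door : Int) (rank : Int) (size_floor : Int) (j : Int) (door : String) : String :=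
  String.ofList (door_build_go size_door rank size_floor j size_door.toNat 0 door.toList)

-- ===== PORT B =====
-- '|' * n is List.replicate n.toNat '|' (Python repetition of a negative count is empty).
def door_build_alt (size_door : Int) (rank : Int) (size_floor : Int) (j : Int) (door : String) : String :=
  if rank ≥ 5 ∧ j = PySem.Int.floordiv (size_floor - 1) 2 + 1 ∧ size_door ≥ 2 then
    String.ofList (door.toList ++ List.replicate (size_door - 2).toNat '|' ++ ['$', '|'])
  else
    String.ofList (door.toList ++ List.replicate size_door.toNat '|')

-- ===== PRECONDITION & SPEC =====
def Spec_door_build (size_door : Int) (rank : Int) (size_floor : Int) (j : Int) (door : String) (out : String) : Prop := out = door_build_alt size_door rank size_floor j door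
instance (size_door : Int) (rank : Int) (size_floor : Int) (j : Int) (door : String) (out : String) : Decidable (Spec_door_build size_door rank size_floor j door out) := by unfold Spec_door_build; infer_instance

-- ===== CLAIM (what is proved, stated in full; the proofs are below) =====
def Claim_equal_door_build : Prop := ∀ (size_door : Int) (rank : Int) (size_floor : Int) (j : Int) (door : String), Dom_door_build size_door rank size_floor j door → Spec_door_build size_door rank size_floor j door (door_build size_door rank size_floor j door)

-- ===== LEMMAS AND PROOFS =====

-- A's float-ceil trigger equals B's integer formula.
theorem ceil_form (s : Int) :
    -(PySem.Int.floordiv (-(s - 2)) 2) + 1 = PySem.Int.floordiv (s - 1) 2 + 1 := by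
  rw [PySem.Int.floordiv_eq_ediv_of_pos (by omega), PySem.Int.floordiv_eq_ediv_of_pos (by omega)]
  omega

-- Loop characterisation: with count = size_door - n, the loop appends n pipes, or n-2 pipes and "$|"
-- when the trigger fires (which happens exactly when n reaches down to 2).
theorem go_spec (size_door rank size_floor j : Int) :
    ∀ (n : Nat) (door : List Char),
      door_build_go size_door rank size_floor j n (size_door - n) door =
        if rank ≥ 5 ∧ j = -(PySem.Int.floordiv (-(size_floor - 2)) 2) + 1 ∧ 2 ≤ n then
          door ++ List.replicate (n - 2) '|' ++ ['$', '|']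
        else
          door ++ List.replicate n '|' := by
  intro n
  induction n with
  | zero => intro door; simp [door_build_go]
  | succ m ih =>
    intro door
    rw [door_build_go]
    by_cases htr : rank ≥ 5 ∧ j = -(PySem.Int.floordiv (-(size_floor - 2)) 2) + 1
    · by_cases hm : m = 1
      · subst hm
        rw [if_pos ⟨htr.1, htr.2, by omega⟩, if_pos ⟨htr.1, htr.2, by omega⟩]
        simp
      · rw [if_neg (by rintro ⟨_, _, h⟩; omega)]
        have : size_door - (↑m + 1 : Nat) + 1 = size_door - m := by push_cast; ring
        rw [this] at *
        rw [ih (door ++ ['|'])]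
        by_cases h2 : 2 ≤ m
        · rw [if_pos ⟨htr.1, htr.2, h2⟩, if_pos ⟨htr.1, htr.2, by omega⟩]
          have : m + 1 - 2 = (m - 2) + 1 := by omega
          rw [this, List.replicate_succ]
          simp
        · have hm0 : m = 0 := by omega
          subst hm0
          rw [if_neg (by rintro ⟨_, _, h⟩; omega), if_neg (by rintro ⟨_, _, h⟩; omega)]
          simp [List.replicate_succ]
    · rw [if_neg (by rintro ⟨h1, h2, _⟩; exact htr ⟨h1, h2⟩)]
      have : size_door - (↑m + 1 : Nat) + 1 = size_door - m := by push_cast; ring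
      rw [this] at *
      rw [ih (door ++ ['|'])]
      rw [if_neg (by rintro ⟨h1, h2, _⟩; exact htr ⟨h1, h2⟩),
          if_neg (by rintro ⟨h1, h2, _⟩; exact htr ⟨h1, h2⟩)]
      simp [List.replicate_succ]

-- ===== VERDICT (by name: the statement is the Claim_ definition above) =====
theorem door_build_spec : Claim_equal_door_build := by
  intro size_door rank size_floor j door _
  unfold Spec_door_build door_build door_build_alt
  by_cases hneg : size_door < 0
  · have h0 : size_door.toNat = 0 := by omega
    rw [h0]
    rw [if_neg (by rintro ⟨_, _, h⟩; omega)]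
    simp [door_build_go, List.replicate]
  · have hc : (0 : Int) = size_door - size_door.toNat := by omega
    rw [hc, go_spec, ceil_form]
    by_cases htr : rank ≥ 5 ∧ j = PySem.Int.floordiv (size_floor - 1) 2 + 1
    · by_cases h2 : 2 ≤ size_door
      · rw [if_pos ⟨htr.1, htr.2, by omega⟩, if_pos ⟨htr.1, htr.2, h2⟩]
        have : size_door.toNat - 2 = (size_door - 2).toNat := by omega
        rw [this]
      · rw [if_neg (by rintro ⟨_, _, h⟩; omega), if_neg (by rintro ⟨_, _, h⟩; omega)]
    · rw [if_neg (by rintro ⟨h1, h2, _⟩; exact htr ⟨h1, h2⟩),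
          if_neg (by rintro ⟨h1, h2, _⟩; exact htr ⟨h1, h2⟩)]
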